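-- pv_equiv track=rewrite | github.com/LucasNakamuraB/UEM | FA/Listas_ED/Lista_Repet.py | sep_pn
-- ===== SOURCE A (Python) =====
-- def sep_pn(lst):
--     '''
--     recebe *lst* e retorna uma lista com os numeros negativos no inicio e
--     positivos no final
--
--     exemplo
--
--     >>> sep_pn([1,-1,2,-2,3,-3])
--     [-1, -2, -3, 1, 2, 3]
--     '''
--     l_pos = []
--     l_neg = []
--     for i in lst:
--         if i >= 0:
--             l_pos.append(i)
--         else:
--             l_neg.append(i)
--     return l_neg + l_pos
-- ===== SOURCE B (Python) =====
-- def sep_pn(lst):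
--     # idiomatic: single stable sort by the boolean key (negatives first)
--     return sorted(lst, key=lambda i: i >= 0)
-- ===== Notes on version B (the rewrite author's own statement) =====
-- stated objective: idiomatic
-- what changed: Replaces the two-accumulator partition-and-concatenate loop with a single stable sort keyed on the boolean i >= 0, so negatives (key False) precede non-negatives (key True) each in original order.
import Mathlib
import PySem

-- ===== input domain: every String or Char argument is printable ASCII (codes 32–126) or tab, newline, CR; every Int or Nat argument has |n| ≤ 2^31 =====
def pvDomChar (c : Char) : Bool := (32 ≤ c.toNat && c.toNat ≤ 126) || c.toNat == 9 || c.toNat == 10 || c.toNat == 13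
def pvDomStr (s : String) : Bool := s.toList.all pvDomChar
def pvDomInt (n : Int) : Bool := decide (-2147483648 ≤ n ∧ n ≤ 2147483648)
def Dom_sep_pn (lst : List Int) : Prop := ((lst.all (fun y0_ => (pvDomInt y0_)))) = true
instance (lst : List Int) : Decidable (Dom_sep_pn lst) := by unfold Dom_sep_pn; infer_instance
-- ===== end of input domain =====

-- ===== PORT A =====
-- A: one pass, appending each element to a positive or a negative bucket, then l_neg + l_pos.
def sep_pn (lst : List Int) : List Int :=
  let st := lst.foldl
    (fun (acc : List Int × List Int) i =>
      if 0 ≤ i then (acc.1 ++ [i], acc.2) else (acc.1, acc.2 ++ [i]))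
    ([], [])
  st.2 ++ st.1

-- ===== PORT B =====
-- B: sorted(lst, key=lambda i: i >= 0) — one stable sort by the boolean key.
def sep_pn_alt (lst : List Int) : List Int :=
  PySem.List.sorted lst (fun i => decide (0 ≤ i)) false

-- ===== PRECONDITION & SPEC =====
def Spec_sep_pn (lst : List Int) (out : List Int) : Prop := out = sep_pn_alt lst
instance (lst : List Int) (out : List Int) : Decidable (Spec_sep_pn lst out) := by unfold Spec_sep_pn; infer_instance

-- ===== CLAIM (what is proved, stated in full; the proofs are below) =====
def Claim_equal_sep_pn : Prop := ∀ (lst : List Int), Dom_sep_pn lst → Spec_sep_pn lst (sep_pn lst)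

-- ===== LEMMAS AND PROOFS =====

-- the comparison function stable insertion sort uses for B's key
def pvBf : Int → Int → Bool := fun a b => decide ((decide (0 ≤ a) : Bool) < decide (0 ≤ b))

lemma pvBf_eq : (fun a b => decide ((fun i => decide ((0:Int) ≤ i)) a < (fun i => decide ((0:Int) ≤ i)) b)) = pvBf := rfl

-- a non-negative element is never "before" anything: it goes to the end
lemma ins_nonneg (x : Int) (hx : 0 ≤ x) (l : List Int) :
    PySem.List.insertBy pvBf x l = l ++ [x] := by
  induction l with
  | nil => rfl
  | cons y t ih =>
    simp [PySem.List.insertBy, pvBf, hx, ih]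

-- a negative element walks past the negatives and lands before the first non-negative
lemma ins_neg (x : Int) (hx : x < 0) (ln lp : List Int)
    (hn : ∀ y ∈ ln, y < 0) (hp : ∀ y ∈ lp, 0 ≤ y) :
    PySem.List.insertBy pvBf x (ln ++ lp) = ln ++ x :: lp := by
  induction ln with
  | nil =>
    cases lp with
    | nil => rfl
    | cons y t =>
      have hy : 0 ≤ y := hp y (by simp)
      simp [PySem.List.insertBy, pvBf, hy, not_le.mpr hx]
  | cons y t ih =>
    have hy : y < 0 := hn y (by simp)
    simp only [List.cons_append, PySem.List.insertBy, pvBf, not_le.mpr hx, not_le.mpr hy]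
    simp [ih (fun z hz => hn z (by simp [hz]))]

-- loop invariant: A's buckets concatenated equal B's insertion-sort accumulator
lemma loop_eq (lst : List Int) : ∀ (lp ln : List Int),
    (∀ y ∈ lp, 0 ≤ y) → (∀ y ∈ ln, y < 0) →
    (let st := lst.foldl
        (fun (acc : List Int × List Int) i =>
          if 0 ≤ i then (acc.1 ++ [i], acc.2) else (acc.1, acc.2 ++ [i]))
        (lp, ln)
     st.2 ++ st.1)
    = lst.foldl (fun acc x => PySem.List.insertBy pvBf x acc) (ln ++ lp) := by
  induction lst with
  | nil => intro lp ln _ _; rfl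
  | cons i rest ih =>
    intro lp ln hp hn
    by_cases hi : 0 ≤ i
    · have h1 := ih (lp ++ [i]) ln
        (fun y hy => by rcases List.mem_append.mp hy with h | h
                        · exact hp y h
                        · simp at h; omega) hn
      simp only [List.foldl_cons, hi, if_pos]
      rw [h1, ins_nonneg i hi, List.append_assoc]
    · have hi' : i < 0 := by omega
      have h1 := ih lp (ln ++ [i]) hp
        (fun y hy => by rcases List.mem_append.mp hy with h | h
                        · exact hn y h
                        · simp at h; omega)
      simp only [List.foldl_cons, hi, if_neg, not_false_iff]
      rw [h1, ins_neg i hi' ln lp hn hp]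
      simp

-- ===== VERDICT (by name: the statement is the Claim_ definition above) =====
theorem sep_pn_spec : Claim_equal_sep_pn := by
  intro lst _
  unfold Spec_sep_pn sep_pn sep_pn_alt PySem.List.sorted
  simp only [if_neg (by decide : ¬ (false = true)), pvBf_eq]
  exact loop_eq lst [] [] (by simp) (by simp)
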